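-- pv_equiv track=rewrite | github.com/arian0zen/Striver-s-SDE-Sheet | largest_subarray_with_0_sum.py | sumzero
-- ===== SOURCE A (Python) =====
-- def sumzero(nums):
--     res = []
--     current_sum = nums[0]
--     for i in range(1, len(nums)):
--         current_sum += nums[i]
--         if current_sum > 0:
--             current_sum = 0
--         else:
--             res.append(nums[i])
--
--     return res
-- ===== SOURCE B (Python) =====
-- def sumzero(nums):
--     # Prefix-sum / running-max algorithm: nums[i] (i>=1) is selected exactly when
--     # P[i] <= max(0, P[1], ..., P[i-1]); A's clamped sum is P_i minus that max.
--     P = []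
--     s = 0
--     for x in nums:
--         s += x
--         P.append(s)
--     M = [0]
--     m = 0
--     for p in P[1:]:
--         m = max(m, p)
--         M.append(m)
--     return [x for x, p, m in zip(nums[1:], P[1:], M) if p <= m]
-- ===== Notes on version B (the rewrite author's own statement) =====
-- stated objective: alternative
-- what changed: B replaces A's clamp-and-reset running sum with a prefix-sum/running-max algorithm: it builds the global prefix sums P, then the running maxima M[i] = max(0, P[1..i]), and selects nums[i] exactly when P[i] <= M[i-1]; A's clamped state is never computed (it equals P_i - M_i).
import Mathlib
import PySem

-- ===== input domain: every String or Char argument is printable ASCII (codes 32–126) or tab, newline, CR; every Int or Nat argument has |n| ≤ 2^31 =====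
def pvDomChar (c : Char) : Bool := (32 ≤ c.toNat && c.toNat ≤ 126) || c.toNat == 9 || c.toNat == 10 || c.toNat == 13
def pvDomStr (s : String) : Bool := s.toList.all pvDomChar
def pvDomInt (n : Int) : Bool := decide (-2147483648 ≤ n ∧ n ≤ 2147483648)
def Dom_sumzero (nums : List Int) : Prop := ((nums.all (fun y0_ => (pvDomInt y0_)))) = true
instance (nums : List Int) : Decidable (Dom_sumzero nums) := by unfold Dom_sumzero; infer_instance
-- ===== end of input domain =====

-- B replaces A's clamp-and-reset running sum with prefix sums plus a running maximum; same cost, different algorithm.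

-- ===== PORT A =====
-- A: res=[], current_sum=nums[0]; for each later element add it, reset to 0 if positive else append it.
def sumzero (nums : List Int) : List Int :=
  match nums with
  | [] => []   -- unreachable under Pre_sumzero (Python raises IndexError on [])
  | c :: rest =>
    (rest.foldl (fun (p : List Int × Int) x =>
      if p.2 + x > 0 then (p.1, (0 : Int)) else (p.1 ++ [x], p.2 + x)) ([], c)).1

-- ===== PORT B =====
-- B: build prefix sums P, then running maxima M (seeded with 0), keep nums[i] where P[i] ≤ M[i-1].
def sumzero_alt (nums : List Int) : List Int :=
  let P := (nums.foldl (fun (q : List Int × Int) x => (q.1 ++ [q.2 + x], q.2 + x)) ([], 0)).1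
  let M := ((PySem.List.slice P (some 1) none).foldl
      (fun (q : List Int × Int) p => (q.1 ++ [max q.2 p], max q.2 p)) ([0], 0)).1
  (((PySem.List.slice nums (some 1) none).zip ((PySem.List.slice P (some 1) none).zip M)).filter
      (fun q => q.2.1 ≤ q.2.2)).map (fun q => q.1)

-- ===== PRECONDITION & SPEC =====
-- Pre_ excludes only the empty list, on which Python A raises IndexError.
def Pre_sumzero (nums : List Int) : Prop := nums ≠ []
instance (nums : List Int) : Decidable (Pre_sumzero nums) := by unfold Pre_sumzero; infer_instance
def pvWitness_sumzero : List Int := [1, -2, 3]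

def Spec_sumzero (nums : List Int) (out : List Int) : Prop := out = sumzero_alt nums
instance (nums : List Int) (out : List Int) : Decidable (Spec_sumzero nums out) := by unfold Spec_sumzero; infer_instance

-- ===== CLAIM (what is proved, stated in full; the proofs are below) =====
def Claim_equal_sumzero : Prop := ∀ (nums : List Int), Dom_sumzero nums → Pre_sumzero nums → Spec_sumzero nums (sumzero nums)

-- ===== LEMMAS AND PROOFS =====

-- recursive views of the three loops
def pvAcol : List Int → Int → List Int
  | [], _ => []
  | x :: xs, s => if s + x > 0 then pvAcol xs 0 else x :: pvAcol xs (s + x)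

def pvPsums : Int → List Int → List Int
  | _, [] => []
  | s, x :: xs => (s + x) :: pvPsums (s + x) xs

def pvMaxes : Int → List Int → List Int
  | _, [] => []
  | m, p :: ps => max m p :: pvMaxes (max m p) ps

theorem pvFoldA (rest : List Int) : ∀ (acc : List Int) (s : Int),
    (rest.foldl (fun (p : List Int × Int) x =>
      if p.2 + x > 0 then (p.1, (0 : Int)) else (p.1 ++ [x], p.2 + x)) (acc, s)).1
    = acc ++ pvAcol rest s := by
  induction rest with
  | nil => simp [pvAcol]
  | cons x xs ih =>
    intro acc s
    by_cases h : s + x > 0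
    · simp [pvAcol, h, ih]
    · simp [pvAcol, h, ih]

theorem pvFoldP (l : List Int) : ∀ (acc : List Int) (s : Int),
    (l.foldl (fun (q : List Int × Int) x => (q.1 ++ [q.2 + x], q.2 + x)) (acc, s)).1
    = acc ++ pvPsums s l := by
  induction l with
  | nil => simp [pvPsums]
  | cons x xs ih => intro acc s; simp [pvPsums, ih]

theorem pvFoldM (l : List Int) : ∀ (acc : List Int) (m : Int),
    (l.foldl (fun (q : List Int × Int) p => (q.1 ++ [max q.2 p], max q.2 p)) (acc, m)).1
    = acc ++ pvMaxes m l := by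
  induction l with
  | nil => simp [pvMaxes]
  | cons p ps ih => intro acc m; simp [pvMaxes, ih]

-- core: A's collected list equals the prefix-sum / running-max selection
theorem pvCore (rest : List Int) : ∀ (p m : Int),
    pvAcol rest (p - m)
    = ((rest.zip ((pvPsums p rest).zip (m :: pvMaxes m (pvPsums p rest)))).filter
        (fun q => q.2.1 ≤ q.2.2)).map (fun q => q.1) := by
  induction rest with
  | nil => intro p m; simp [pvAcol, pvPsums]
  | cons x xs ih =>
    intro p m
    by_cases h : p + x > m
    · have hA : (p - m) + x > 0 := by omega
      have hmax : max m (p + x) = p + x := by omega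
      have hle : ¬ (p + x ≤ m) := by omega
      have := ih (p + x) (p + x)
      simp only [pvAcol, pvPsums, pvMaxes, hA, if_pos, List.zip_cons_cons,
        List.filter_cons, hmax] at *
      simpa [hle, show p + x - (p + x) = (0:Int) by ring] using this
    · have hA : ¬ ((p - m) + x > 0) := by omega
      have hmax : max m (p + x) = m := by omega
      have hle : p + x ≤ m := by omega
      have := ih (p + x) m
      simp only [pvAcol, pvPsums, pvMaxes, hA, List.zip_cons_cons,
        List.filter_cons, hmax] at *
      simpa [hle, show p + x - m = p - m + x by ring] using this

-- ===== VERDICT (by name: the statements are the Claim_ definitions above) =====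
theorem sumzero_spec : Claim_equal_sumzero := by
  intro nums _ hpre
  unfold Spec_sumzero sumzero sumzero_alt
  match nums with
  | [] => exact absurd rfl hpre
  | c :: rest =>
    simp only [pvFoldA, pvFoldP, List.nil_append, PySem.List.slice_from_one, pvPsums,
      List.tail_cons, pvFoldM, zero_add]
    have := pvCore rest c 0
    simpa [show c - 0 = c by ring] using this
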